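-- pv_equiv track=rewrite | github.com/myreprise/advent_of_code | 2015/day20 - infinite elves and infinite houses/p2_solution.py | find_min_house_part2
-- ===== SOURCE A (Python) =====
-- def find_min_house_part2(target_presents):
--     """Find the smallest house number that gets at least target_presents, considering the new rules."""
--     max_house = target_presents // 11  # Reasonable upper bound
--     presents = [0] * (max_house + 1)  # Array to store presents per house
--
--     for elf in range(1, max_house + 1):
--         # Each elf delivers to at most 50 houses
--         for house in range(elf, min(max_house + 1, elf * 50 + 1), elf):
--             presents[house] += 11 * elf
--
--     # Find the smallest house meeting the target
--     for house, total in enumerate(presents):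
--         if total >= target_presents:
--             return house
-- ===== SOURCE B (Python) =====
-- def find_min_house_part2(target_presents):
--     """Find the smallest house number that gets at least target_presents, considering the new rules."""
--     max_house = target_presents // 11
--     for house in range(0, max_house + 1):
--         total = 0
--         for q in range(1, 51):
--             if house % q == 0:
--                 total += 11 * (house // q)
--         if total >= target_presents:
--             return house
-- ===== Notes on version B (the rewrite author's own statement) =====
-- stated objective: alternative
-- what changed: Replaces the full elf-by-elf sieve array (every elf marks its multiples, then a scan) by a single pass over houses that computes each house's total directly from its at most fifty serving elves house//q (q dividing house, q up to the fifty-house limit), returning at the first qualifying house instead of always filling the whole array.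
import Mathlib
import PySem

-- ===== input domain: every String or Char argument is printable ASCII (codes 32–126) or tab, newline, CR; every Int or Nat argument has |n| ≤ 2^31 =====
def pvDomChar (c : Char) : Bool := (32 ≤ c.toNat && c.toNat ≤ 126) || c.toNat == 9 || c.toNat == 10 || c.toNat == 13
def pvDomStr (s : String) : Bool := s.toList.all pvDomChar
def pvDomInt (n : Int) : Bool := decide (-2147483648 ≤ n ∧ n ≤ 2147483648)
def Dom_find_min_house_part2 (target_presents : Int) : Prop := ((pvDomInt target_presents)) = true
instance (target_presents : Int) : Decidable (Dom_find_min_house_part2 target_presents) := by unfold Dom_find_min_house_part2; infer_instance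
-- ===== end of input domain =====

-- B replaces A's full elf-by-elf sieve array by a direct per-house total (each house is served
-- by the elves house//q for the q ≤ 50 dividing house), stopping at the first qualifying house
-- instead of always filling the whole array (objective: alternative algorithm, same cost).

-- ===== PORT A =====
-- the final 'for house, total in enumerate(presents): if total >= target: return house'
def pvAScan : List (Int × Int) → Int → Option Int
  | [], _ => none
  | (house, total) :: rest, t => if total ≥ t then some house else pvAScan rest t

def find_min_house_part2 (target_presents : Int) : Option Int :=
  let max_house := PySem.Int.floordiv target_presents 11
  let presents0 : List Int := List.replicate (max_house + 1).toNat 0   -- [0] * (max_house + 1)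
  let presents := (PySem.List.pyRange 1 (max_house + 1) 1).foldl
    (fun pres elf =>
      (PySem.List.pyRange elf (min (max_house + 1) (elf * 50 + 1)) elf).foldl
        (fun pres2 house =>
          PySem.List.pySetD pres2 house (PySem.List.pyGetD pres2 house 0 + 11 * elf)) pres)
    presents0
  pvAScan (PySem.List.enumerate presents) target_presents

-- ===== PORT B =====
-- total = sum of 11 * (house // q) over q in range(1, 51) dividing house
def pvBTotal (house : Int) : Int :=
  (PySem.List.pyRange 1 51 1).foldl
    (fun total q =>
      if PySem.Int.mod house q = 0 then total + 11 * PySem.Int.floordiv house q else total) 0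

def pvBLoop : List Int → Int → Option Int
  | [], _ => none
  | house :: rest, t => if pvBTotal house ≥ t then some house else pvBLoop rest t

def find_min_house_part2_alt (target_presents : Int) : Option Int :=
  let max_house := PySem.Int.floordiv target_presents 11
  pvBLoop (PySem.List.pyRange 0 (max_house + 1) 1) target_presents

-- ===== PRECONDITION & SPEC =====
def Spec_find_min_house_part2 (target_presents : Int) (out : Option Int) : Prop := out = find_min_house_part2_alt target_presents
instance (target_presents : Int) (out : Option Int) : Decidable (Spec_find_min_house_part2 target_presents out) := by unfold Spec_find_min_house_part2; infer_instance

-- ===== CLAIM (what is proved, stated in full; the proofs are below) =====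
def Claim_equal_find_min_house_part2 : Prop := ∀ (target_presents : Int), Dom_find_min_house_part2 target_presents → Spec_find_min_house_part2 target_presents (find_min_house_part2 target_presents)

-- ===== LEMMAS AND PROOFS =====

-- list-sum over List.range = Finset.range sum
theorem pv_sum_map_range (f : Nat → Int) : ∀ n, (((List.range n).map f).sum = ∑ k ∈ Finset.range n, f k) := by
  intro n
  induction n with
  | zero => simp
  | succ m ih => simp [List.range_succ, Finset.sum_range_succ, ih]

-- 'if p x: acc += g x' loop is init + sum of the guarded terms
theorem pv_foldl_ite_add (p : Int → Prop) [DecidablePred p] (g : Int → Int) :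
    ∀ (l : List Int) (a : Int),
      l.foldl (fun acc x => if p x then acc + g x else acc) a
        = a + (l.map (fun x => if p x then g x else 0)).sum := by
  intro l
  induction l with
  | nil => simp
  | cons x xs ih =>
      intro a
      by_cases hx : p x <;> simp [hx, ih, add_assoc]

theorem pv_pyGetD_replicate (n : Nat) (h : Int) (hh : 0 ≤ h) :
    PySem.List.pyGetD (List.replicate n (0 : Int)) h 0 = 0 := by
  rw [PySem.List.pyGetD_of_nonneg _ _ hh]
  rw [List.getD_eq_getElem?_getD, List.getElem?_replicate]
  split <;> simp

theorem pv_nodup_pyRange_pos (a b s : Int) (hs : 0 < s) : (PySem.List.pyRange a b s).Nodup := by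
  rw [PySem.List.pyRange_of_pos a b hs]
  refine List.Nodup.map ?_ (List.nodup_range)
  intro k1 k2 hk
  have hk' : a + s * (k1 : Int) = a + s * (k2 : Int) := hk
  have h2 : s * (k1 : Int) = s * (k2 : Int) := by omega
  have := mul_left_cancel₀ (by omega : (s : Int) ≠ 0) h2
  exact_mod_cast this

theorem pv_mem_inner (elf h stop : Int) (he : 1 ≤ elf) :
    h ∈ PySem.List.pyRange elf stop elf ↔ elf ∣ h ∧ elf ≤ h ∧ h < stop := by
  rw [PySem.List.mem_pyRange_iff_of_pos (by omega)]
  constructor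
  · rintro ⟨h1, h2, d⟩
    refine ⟨?_, h1, h2⟩
    have : elf ∣ (h - elf) + elf := dvd_add d (dvd_refl elf)
    simpa using this
  · rintro ⟨d, h1, h2⟩
    exact ⟨h1, h2, dvd_sub d (dvd_refl elf)⟩

theorem pv_getD_pySetD_int (pres : List Int) (i h v : Int)
    (h0 : 0 ≤ i) (hl : i < (pres.length : Int)) (hh : 0 ≤ h) :
    PySem.List.pyGetD (PySem.List.pySetD pres i v) h 0
      = if h = i then v else PySem.List.pyGetD pres h 0 := by
  have hi : i = ((i.toNat : Nat) : Int) := by omega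
  have hhn : h = ((h.toNat : Nat) : Int) := by omega
  rw [hi, hhn, PySem.List.pyGetD_pySetD_natCast _ _ _ _ _ (by omega)]
  simp only [Nat.cast_inj]

theorem pv_len_foldl_addAt (c : Int) :
    ∀ (R : List Int) (pres : List Int),
      (R.foldl (fun p i => PySem.List.pySetD p i (PySem.List.pyGetD p i 0 + c)) pres).length
        = pres.length := by
  intro R
  induction R with
  | nil => intro pres; rfl
  | cons x xs ih => intro pres; rw [List.foldl_cons, ih, PySem.List.length_pySetD]

theorem pv_getD_foldl_addAt (c h : Int) (hh : 0 ≤ h) :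
    ∀ (R : List Int) (pres : List Int), R.Nodup →
      (∀ x ∈ R, 0 ≤ x ∧ x < (pres.length : Int)) →
      PySem.List.pyGetD (R.foldl (fun p i => PySem.List.pySetD p i (PySem.List.pyGetD p i 0 + c)) pres) h 0
        = PySem.List.pyGetD pres h 0 + (if h ∈ R then c else 0) := by
  intro R
  induction R with
  | nil => intro pres _ _; simp
  | cons x xs ih =>
      intro pres hnd hval
      have hx := hval x (by simp)
      have hlen : (PySem.List.pySetD pres x (PySem.List.pyGetD pres x 0 + c)).length = pres.length :=
        PySem.List.length_pySetD _ _ _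
      rw [List.foldl_cons, ih _ (hnd.of_cons)
        (by intro y hy; rw [hlen]; exact hval y (by simp [hy]))]
      rw [pv_getD_pySetD_int _ _ _ _ hx.1 hx.2 hh]
      by_cases hhx : h = x
      · subst hhx
        have hnx : h ∉ xs := (List.nodup_cons.mp hnd).1
        rw [if_pos rfl, if_neg hnx, if_pos (by simp)]
        ring
      · rw [if_neg hhx]
        by_cases hm : h ∈ xs
        · rw [if_pos hm, if_pos (by simp [hm])]
        · rw [if_neg hm, if_neg (by simp [hhx, hm])]

theorem pv_len_outer (N : Int) :
    ∀ (L : List Int) (pres : List Int),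
      (L.foldl (fun p elf =>
        (PySem.List.pyRange elf (min N (elf * 50 + 1)) elf).foldl
          (fun p2 house => PySem.List.pySetD p2 house (PySem.List.pyGetD p2 house 0 + 11 * elf)) p) pres).length
        = pres.length := by
  intro L
  induction L with
  | nil => intro pres; rfl
  | cons e es ih => intro pres; rw [List.foldl_cons, ih, pv_len_foldl_addAt]

theorem pv_getD_outer (N h : Int) (hh : 0 ≤ h) (hN : 0 ≤ N) :
    ∀ (L : List Int) (pres : List Int), pres.length = N.toNat →
      (∀ e ∈ L, 1 ≤ e) →
      PySem.List.pyGetD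
        (L.foldl (fun p elf =>
          (PySem.List.pyRange elf (min N (elf * 50 + 1)) elf).foldl
            (fun p2 house => PySem.List.pySetD p2 house (PySem.List.pyGetD p2 house 0 + 11 * elf)) p) pres) h 0
        = PySem.List.pyGetD pres h 0
          + (L.map (fun elf => if h ∈ PySem.List.pyRange elf (min N (elf * 50 + 1)) elf then 11 * elf else 0)).sum := by
  intro L
  induction L with
  | nil => intro pres _ _; simp
  | cons e es ih =>
      intro pres hlen hL
      have he : (1 : Int) ≤ e := hL e (by simp)
      have hlen' : ((PySem.List.pyRange e (min N (e * 50 + 1)) e).foldl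
          (fun p2 house => PySem.List.pySetD p2 house (PySem.List.pyGetD p2 house 0 + 11 * e)) pres).length
          = N.toNat := by rw [pv_len_foldl_addAt]; exact hlen
      rw [List.foldl_cons, ih _ hlen' (by intro y hy; exact hL y (by simp [hy]))]
      rw [pv_getD_foldl_addAt (11 * e) h hh _ pres (pv_nodup_pyRange_pos _ _ _ (by omega))
        (by
          intro x hx
          have hm := (pv_mem_inner e x (min N (e * 50 + 1)) he).mp hx
          have h1 : e ≤ x := hm.2.1
          have h2 : x < min N (e * 50 + 1) := hm.2.2
          have h3 : x < N := lt_of_lt_of_le h2 (min_le_left _ _)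
          constructor <;> omega)]
      rw [List.map_cons, List.sum_cons]
      ring


theorem pv_divisors_flip (n : Nat) (hn : 1 ≤ n) :
    ∑ d ∈ n.divisors, (if n ≤ 50*d then (11*(d:Int)) else 0)
      = ∑ d ∈ n.divisors, (if d ≤ 50 then (11*((n/d : Nat):Int)) else 0) := by
  rw [← Nat.sum_div_divisors n (fun q => if q ≤ 50 then (11*((n/q : Nat):Int)) else 0)]
  refine Finset.sum_congr rfl ?_
  intro d hd
  obtain ⟨hdvd, hn0⟩ := Nat.mem_divisors.mp hd
  have hd0 : 0 < d := Nat.pos_of_mem_divisors hd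
  obtain ⟨k, rfl⟩ := hdvd
  have hk0 : 0 < k := by
    rcases Nat.eq_zero_or_pos k with h0 | h0
    · subst h0; simp at hn0
    · exact h0
  rw [Nat.mul_div_cancel_left k hd0, Nat.mul_div_cancel _ hk0]
  refine if_congr ?_ rfl rfl
  constructor
  · intro hh; nlinarith
  · intro hh; nlinarith

theorem pv_filter_dvd (n m : Nat) (hn : 1 ≤ n) (hnm : n ≤ m) :
    Finset.filter (fun q => q ∣ n) (Finset.Ico 1 (m+1)) = n.divisors := by
  ext q
  simp only [Finset.mem_filter, Finset.mem_Ico, Nat.mem_divisors]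
  constructor
  · rintro ⟨⟨h1, h2⟩, hd⟩; exact ⟨hd, by omega⟩
  · rintro ⟨hd, _⟩
    have hq0 : 0 < q := Nat.pos_of_dvd_of_pos hd (by omega)
    have hqn : q ≤ n := Nat.le_of_dvd (by omega) hd
    exact ⟨⟨hq0, by omega⟩, hd⟩

theorem pv_nat_sum_eq (n m : Nat) (hn : 1 ≤ n) (hnm : n ≤ m) :
    ∑ k ∈ Finset.range m, (if (k+1) ∣ n ∧ n ≤ 50*(k+1) then (11*((k+1:Nat):Int)) else 0)
      = ∑ k ∈ Finset.range 50, (if (k+1) ∣ n then (11*((n/(k+1) : Nat):Int)) else 0) := by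
  have hA1 : ∑ k ∈ Finset.range m, (if (k+1) ∣ n ∧ n ≤ 50*(k+1) then (11*((k+1:Nat):Int)) else 0)
      = ∑ k ∈ Finset.range n, (if (k+1) ∣ n ∧ n ≤ 50*(k+1) then (11*((k+1:Nat):Int)) else 0) := by
    refine (Finset.sum_subset ?_ ?_).symm
    · intro x hx; simp only [Finset.mem_range] at hx ⊢; omega
    intro k _ hk
    have hk' : n ≤ k := by simpa using hk
    refine if_neg ?_
    rintro ⟨hd, -⟩
    have := Nat.le_of_dvd (by omega) hd
    omega
  have hIco : ∀ (M : Nat) (f : Nat → Int), ∑ q ∈ Finset.Ico 1 (M+1), f q = ∑ k ∈ Finset.range M, f (k+1) := by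
    intro M f
    rw [Finset.sum_Ico_eq_sum_range]
    simp [add_comm]
  have hA2 : ∑ k ∈ Finset.range n, (if (k+1) ∣ n ∧ n ≤ 50*(k+1) then (11*((k+1:Nat):Int)) else 0)
      = ∑ d ∈ n.divisors, (if n ≤ 50*d then (11*(d:Int)) else 0) := by
    rw [← hIco n (fun q => if q ∣ n ∧ n ≤ 50*q then (11*(q:Int)) else 0), ← pv_filter_dvd n n hn le_rfl, Finset.sum_filter]
    refine Finset.sum_congr rfl ?_
    intro q _
    by_cases h1 : q ∣ n <;> by_cases h2 : n ≤ 50*q <;> simp [h1, h2]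
  have hB : ∑ k ∈ Finset.range 50, (if (k+1) ∣ n then (11*((n/(k+1) : Nat):Int)) else 0)
      = ∑ d ∈ n.divisors, (if d ≤ 50 then (11*((n/d : Nat):Int)) else 0) := by
    rw [← hIco 50 (fun q => if q ∣ n then (11*((n/q : Nat):Int)) else 0)]
    have hset : Finset.filter (fun q => q ∣ n) (Finset.Ico 1 51) = Finset.filter (fun q => q ≤ 50) n.divisors := by
      ext q
      simp only [Finset.mem_filter, Finset.mem_Ico, Nat.mem_divisors]
      constructor
      · rintro ⟨⟨h1, h2⟩, hd⟩; exact ⟨⟨hd, by omega⟩, by omega⟩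
      · rintro ⟨⟨hd, hn0⟩, h50⟩
        have hq0 : 0 < q := Nat.pos_of_dvd_of_pos hd (by omega)
        exact ⟨⟨hq0, by omega⟩, hd⟩
    rw [← Finset.sum_filter (fun q => q ∣ n) (fun q => (11*((n/q : Nat):Int))), hset, Finset.sum_filter]
  rw [hA1, hA2, hB, pv_divisors_flip n hn]

-- the per-house totals agree: A's sieve contribution sum equals B's direct total
theorem pv_total_eq (N h : Int) (h0 : 0 ≤ h) (hN : h < N) :
    ((PySem.List.pyRange 1 N 1).map
        (fun elf => if h ∈ PySem.List.pyRange elf (min N (elf * 50 + 1)) elf then 11 * elf else 0)).sum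
      = pvBTotal h := by
  have hB : pvBTotal h
      = ((PySem.List.pyRange 1 51 1).map
          (fun q => if PySem.Int.mod h q = 0 then 11 * PySem.Int.floordiv h q else 0)).sum := by
    unfold pvBTotal
    rw [pv_foldl_ite_add (fun q => PySem.Int.mod h q = 0) (fun q => 11 * PySem.Int.floordiv h q),
      zero_add]
  have hA : (PySem.List.pyRange 1 N 1).map
        (fun elf => if h ∈ PySem.List.pyRange elf (min N (elf * 50 + 1)) elf then 11 * elf else 0)
      = (PySem.List.pyRange 1 N 1).map
        (fun elf => if elf ∣ h ∧ elf ≤ h ∧ h ≤ 50 * elf then 11 * elf else 0) := by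
    refine List.map_congr_left ?_
    intro elf hm
    have he : (1 : Int) ≤ elf := ((PySem.List.mem_pyRange_one.mp hm)).1
    refine if_congr ?_ rfl rfl
    rw [pv_mem_inner _ _ _ he]
    constructor
    · rintro ⟨d, a, b⟩; exact ⟨d, a, by omega⟩
    · rintro ⟨d, a, b⟩; exact ⟨d, a, by omega⟩
  rw [hA, hB]
  by_cases hz : h = 0
  · subst hz
    rw [List.sum_eq_zero, List.sum_eq_zero]
    · intro x hx
      obtain ⟨q, hm, rfl⟩ := List.mem_map.mp hx
      have hq : (1 : Int) ≤ q := (PySem.List.mem_pyRange_one.mp hm).1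
      rw [if_pos (PySem.Int.mod_eq_zero_iff_dvd 0 q |>.mpr (dvd_zero q)),
        PySem.Int.floordiv_eq_ediv_of_pos (by omega)]
      simp
    · intro x hx
      obtain ⟨elf, hm, rfl⟩ := List.mem_map.mp hx
      have he : (1 : Int) ≤ elf := (PySem.List.mem_pyRange_one.mp hm).1
      refine if_neg ?_
      rintro ⟨-, hle, -⟩
      omega
  · -- h ≥ 1
    have h1 : (1 : Int) ≤ h := by omega
    set n := h.toNat with hn_def
    have hcast : ((n : Nat) : Int) = h := by omega
    have hn1 : 1 ≤ n := by omega
    rw [PySem.List.pyRange_one 1 N, PySem.List.pyRange_one 1 51, List.map_map, List.map_map,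
      pv_sum_map_range, pv_sum_map_range,
      show ((51 : Int) - 1).toNat = 50 by decide]
    have hAk : ∀ k ∈ Finset.range (N - 1).toNat,
        ((fun elf => if elf ∣ h ∧ elf ≤ h ∧ h ≤ 50 * elf then 11 * elf else 0) ∘ fun k : Nat => 1 + (k : Int)) k
          = (if (k+1) ∣ n ∧ n ≤ 50*(k+1) then (11*((k+1:Nat):Int)) else 0) := by
      intro k _
      have hq : ((1 : Int) + (k : Int)) = ((k+1 : Nat) : Int) := by push_cast; ring
      simp only [Function.comp_apply, hq, ← hcast]
      refine if_congr ?_ rfl rfl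
      constructor
      · rintro ⟨d, a, b⟩
        exact ⟨Int.natCast_dvd_natCast.mp d, by exact_mod_cast b⟩
      · rintro ⟨d, b⟩
        refine ⟨Int.natCast_dvd_natCast.mpr d, ?_, by exact_mod_cast b⟩
        exact_mod_cast Nat.le_of_dvd (by omega) d
    have hBk : ∀ k ∈ Finset.range 50,
        ((fun q => if PySem.Int.mod h q = 0 then 11 * PySem.Int.floordiv h q else 0) ∘ fun k : Nat => 1 + (k : Int)) k
          = (if (k+1) ∣ n then (11*((n/(k+1) : Nat):Int)) else 0) := by
      intro k _
      have hq : ((1 : Int) + (k : Int)) = ((k+1 : Nat) : Int) := by push_cast; ring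
      simp only [Function.comp_apply, hq, ← hcast]
      refine if_congr ?_ ?_ rfl
      · rw [PySem.Int.mod_eq_zero_iff_dvd]
        exact Int.natCast_dvd_natCast
      · rw [PySem.Int.floordiv_natCast]
    rw [Finset.sum_congr rfl hAk, Finset.sum_congr rfl hBk]
    exact pv_nat_sum_eq n (N - 1).toNat hn1 (by omega)

theorem pv_scan_eq (f : Int → Int) :
    ∀ (L : List Int) (t : Int), (∀ j ∈ L, f j = pvBTotal j) →
      pvAScan (L.map (fun j => (j, f j))) t = pvBLoop L t := by
  intro L
  induction L with
  | nil => intro t _; rfl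
  | cons x xs ih =>
      intro t hf
      have hx : f x = pvBTotal x := hf x (by simp)
      simp only [List.map_cons, pvAScan, pvBLoop, hx]
      by_cases hge : pvBTotal x ≥ t
      · simp [hge]
      · simp [hge, ih t (by intro j hj; exact hf j (by simp [hj]))]

-- ===== VERDICT (by name: the statement is the Claim_ definition above) =====
theorem find_min_house_part2_spec : Claim_equal_find_min_house_part2 := by
  intro t _
  unfold Spec_find_min_house_part2
  simp only [find_min_house_part2, find_min_house_part2_alt]
  set N : Int := PySem.Int.floordiv t 11 + 1 with hNdef
  by_cases hpos : 0 < N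
  · -- nonempty house array
    have hlen0 : (List.replicate N.toNat (0 : Int)).length = N.toNat := by simp
    have hSlen : ((PySem.List.pyRange 1 N 1).foldl
        (fun pres elf =>
          (PySem.List.pyRange elf (min N (elf * 50 + 1)) elf).foldl
            (fun pres2 house =>
              PySem.List.pySetD pres2 house (PySem.List.pyGetD pres2 house 0 + 11 * elf)) pres)
        (List.replicate N.toNat (0 : Int))).length = N.toNat := by
      rw [pv_len_outer, hlen0]
    rw [PySem.List.enumerate_eq_map_pyRange _ 0]
    have hlenS : PySem.List.len ((PySem.List.pyRange 1 N 1).foldl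
        (fun pres elf =>
          (PySem.List.pyRange elf (min N (elf * 50 + 1)) elf).foldl
            (fun pres2 house =>
              PySem.List.pySetD pres2 house (PySem.List.pyGetD pres2 house 0 + 11 * elf)) pres)
        (List.replicate N.toNat (0 : Int))) = N := by
      rw [PySem.List.len_eq, hSlen]; omega
    rw [hlenS]
    refine pv_scan_eq _ _ t ?_
    intro j hj
    obtain ⟨hj0, hjN⟩ := PySem.List.mem_pyRange_one.mp hj
    rw [pv_getD_outer N j hj0 (by omega) _ _ hlen0
      (by intro e he; exact (PySem.List.mem_pyRange_one.mp he).1)]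
    rw [pv_pyGetD_replicate _ _ hj0, zero_add]
    exact pv_total_eq N j hj0 hjN
  · -- empty house array: both return none
    have hN0 : N.toNat = 0 := by omega
    rw [hN0, List.replicate_zero, PySem.List.pyRange_one_eq_nil (by omega : N ≤ 1),
      PySem.List.pyRange_one_eq_nil (by omega : N ≤ 0)]
    rfl
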